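-- pv_equiv track=rewrite | github.com/rozennrd/ProjectEuler | 49 - Prime permutations.py | comparer_valeurs
-- ===== SOURCE A (Python) =====
-- def comparer_valeurs(dict):
--     for key, val in dict:
--         for key2, val2 in dict:
--             if (key, val) != (key2, val2) and (val == key2):
--                 a= dict[(key, val)]
--                 b= dict[(key2, val2)]
--                 if a == b:
--                     return (key,val, key2, val2)
-- ===== SOURCE B (Python) =====
-- def comparer_valeurs(dict):
--     # Index entries by the PAIR (first component, mapped value): any match must
--     # have key2 == val AND dict[(key2,val2)] == dict[(key,val)], so one keyed
--     # lookup yields exactly the candidates and the inner loop only skips self.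
--     index = {}
--     for key2, val2 in dict:
--         index.setdefault((key2, dict[(key2, val2)]), []).append((key2, val2))
--     for key, val in dict:
--         cands = index.get((val, dict[(key, val)]), [])
--         cand = next((c for c in cands if c != (key, val)), None)
--         if cand is not None:
--             return (key, val, cand[0], cand[1])
-- ===== Notes on version B (the rewrite author's own statement) =====
-- stated objective: faster
-- what changed: B pre-groups the dict keys in one pass by the pair (first component, mapped value), so each outer key does a single keyed lookup and takes the first candidate different from itself, with no inner scan comparing link and values.
import Mathlib
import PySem

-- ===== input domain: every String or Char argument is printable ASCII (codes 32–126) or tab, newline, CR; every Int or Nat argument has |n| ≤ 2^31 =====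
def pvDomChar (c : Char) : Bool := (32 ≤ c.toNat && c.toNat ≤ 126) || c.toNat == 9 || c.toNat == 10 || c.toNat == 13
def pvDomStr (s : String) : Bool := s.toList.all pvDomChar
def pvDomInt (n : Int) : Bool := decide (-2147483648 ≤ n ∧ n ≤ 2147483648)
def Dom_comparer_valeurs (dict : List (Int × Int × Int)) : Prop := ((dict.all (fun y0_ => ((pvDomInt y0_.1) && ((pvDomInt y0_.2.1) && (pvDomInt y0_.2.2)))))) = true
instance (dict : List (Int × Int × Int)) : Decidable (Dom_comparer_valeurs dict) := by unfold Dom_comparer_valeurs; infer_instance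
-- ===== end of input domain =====

-- B groups the dict keys once by the pair (first component, mapped value); each outer key then does one keyed lookup and takes the first candidate other than itself (faster: no inner scan).

-- dict[(k, v)]: first-match lookup of the key (k, v) in the association list (shared input-representation helper)
def cvGet (d : List (Int × Int × Int)) (k v : Int) : Option Int :=
  match d with
  | [] => none
  | e :: rest => if e.1 = k ∧ e.2.1 = v then some e.2.2 else cvGet rest k v

-- ===== PORT A =====
-- inner 'for key2, val2 in dict' loop
def cvInnerA (d : List (Int × Int × Int)) (k v : Int) : List (Int × Int × Int) → Option (Int × Int × Int × Int)
  | [] => none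
  | e :: rest =>
    if (k, v) ≠ (e.1, e.2.1) ∧ v = e.1 then
      if cvGet d k v = cvGet d e.1 e.2.1 then some (k, v, e.1, e.2.1)
      else cvInnerA d k v rest
    else cvInnerA d k v rest

-- outer 'for key, val in dict' loop
def cvOuterA (d : List (Int × Int × Int)) : List (Int × Int × Int) → Option (Int × Int × Int × Int)
  | [] => none
  | e :: rest =>
    match cvInnerA d e.1 e.2.1 d with
    | some r => some r
    | none => cvOuterA d rest

def comparer_valeurs (dict : List (Int × Int × Int)) : Option (Int × Int × Int × Int) :=
  cvOuterA dict dict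

-- ===== PORT B =====
-- index.setdefault((key2, dict[(key2, val2)]), []).append((key2, val2)), one pass
def cvIndex (d : List (Int × Int × Int)) : PySem.Dict (Int × Option Int) (List (Int × Int)) :=
  d.foldl (fun ix e => ix.modify (e.1, cvGet d e.1 e.2.1) [] (fun l => l ++ [(e.1, e.2.1)])) PySem.Dict.empty

def comparer_valeurs_alt (dict : List (Int × Int × Int)) : Option (Int × Int × Int × Int) :=
  let ix := cvIndex dict
  dict.findSome? (fun e =>
    ((ix.getD (e.2.1, cvGet dict e.1 e.2.1) []).find? (fun c => c != (e.1, e.2.1))).map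
      (fun c => (e.1, e.2.1, c.1, c.2)))

-- ===== PRECONDITION & SPEC =====
def Spec_comparer_valeurs (dict : List (Int × Int × Int)) (out : Option (Int × Int × Int × Int)) : Prop := out = comparer_valeurs_alt dict
instance (dict : List (Int × Int × Int)) (out : Option (Int × Int × Int × Int)) : Decidable (Spec_comparer_valeurs dict out) := by unfold Spec_comparer_valeurs; infer_instance

-- ===== CLAIM (what is proved, stated in full; the proofs are below) =====
def Claim_equal_comparer_valeurs : Prop := ∀ (dict : List (Int × Int × Int)), Dom_comparer_valeurs dict → Spec_comparer_valeurs dict (comparer_valeurs dict)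

-- ===== LEMMAS AND PROOFS =====

-- the grouped index at (v, a) holds exactly the pairs of d whose key is v and whose looked-up value is a, in order
theorem cvIndex_getD (d : List (Int × Int × Int)) (v : Int) (a : Option Int) :
    (cvIndex d).getD (v, a) [] =
      (d.filter (fun e => e.1 == v && cvGet d e.1 e.2.1 == a)).map (fun e => (e.1, e.2.1)) := by
  unfold cvIndex
  have h := PySem.Dict.getD_foldl_modify_append
    (l := d.map (fun e => (((e.1, cvGet d e.1 e.2.1) : Int × Option Int), ((e.1, e.2.1) : Int × Int))))
    (d := PySem.Dict.empty) (c := ((v, a) : Int × Option Int))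
  simp only [List.foldl_map] at h
  rw [h]
  simp only [PySem.Dict.getD_empty, List.nil_append, List.filter_map, List.map_map,
    Function.comp_def]
  congr 1

-- A's inner loop over l = take the first element of l's candidates (key v, same looked-up value) other than (k, v)
theorem inner_eq (d : List (Int × Int × Int)) (k v : Int) (l : List (Int × Int × Int)) :
    cvInnerA d k v l =
      ((((l.filter (fun e => e.1 == v && cvGet d e.1 e.2.1 == cvGet d k v)).map
          (fun e => (e.1, e.2.1))).find? (fun c => c != (k, v))).map
        (fun c => (k, v, c.1, c.2))) := by
  induction l with
  | nil => rfl
  | cons e rest ih =>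
    rw [List.filter_cons]
    by_cases hp : (e.1 == v && cvGet d e.1 e.2.1 == cvGet d k v) = true
    · have hv : e.1 = v := by simpa using (Bool.and_elim_left hp)
      have hg : cvGet d e.1 e.2.1 = cvGet d k v := by simpa using (Bool.and_elim_right hp)
      rw [if_pos hp, List.map_cons]
      by_cases hne : (k, v) = (e.1, e.2.1)
      · have hcond : ¬ ((k, v) ≠ (e.1, e.2.1) ∧ v = e.1) := by simp [hne]
        have hb : (((e.1, e.2.1) : Int × Int) != (k, v)) = false := by
          simp [hne.symm]
        rw [List.find?_cons, hb]
        simp only [cvInnerA, if_neg hcond, ih]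
      · have hcond : ((k, v) ≠ (e.1, e.2.1) ∧ v = e.1) := ⟨hne, hv.symm⟩
        have hb : (((e.1, e.2.1) : Int × Int) != (k, v)) = true := by
          simp only [bne_iff_ne]
          exact fun h => hne h.symm
        rw [List.find?_cons, hb]
        simp only [cvInnerA, if_pos hcond, if_pos hg.symm, Option.map_some]
    · rw [if_neg hp]
      have hp' : ¬ (e.1 = v ∧ cvGet d e.1 e.2.1 = cvGet d k v) := by
        intro h
        apply hp
        rw [h.2]
        simp [h.1]
      simp only [cvInnerA]
      split_ifs with h1 h2
      · exact absurd ⟨h1.2.symm, h2.symm⟩ hp'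
      · exact ih
      · exact ih

theorem outer_eq (d : List (Int × Int × Int)) (l : List (Int × Int × Int)) :
    cvOuterA d l = l.findSome? (fun e =>
      (((cvIndex d).getD (e.2.1, cvGet d e.1 e.2.1) []).find? (fun c => c != (e.1, e.2.1))).map
        (fun c => (e.1, e.2.1, c.1, c.2))) := by
  induction l with
  | nil => rfl
  | cons e rest ih =>
    simp only [cvOuterA]
    rw [ih, List.findSome?_cons, cvIndex_getD, ← inner_eq d e.1 e.2.1 d]
    cases cvInnerA d e.1 e.2.1 d <;> rfl

-- ===== VERDICT (by name: the statement is the Claim_ definition above) =====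
theorem comparer_valeurs_spec : Claim_equal_comparer_valeurs := by
  intro d _
  unfold Spec_comparer_valeurs comparer_valeurs comparer_valeurs_alt
  exact outer_eq d d
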